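-- pv_equiv track=rewrite | github.com/CptAdolito/Hundir-La-Flota | IAHandler.py | calcularEstadoIA
-- ===== SOURCE A (Python) =====
-- def calcularEstadoIA(lista_barcos, lista_tocados):
--     #Creamos listas para casillas de barcos tocados y hundidos
--     barcosHundidos = list()
--     barcosTocados = list()
--     #Para cada casilla de barco la agrego a "hundidos", pero si no ha sido tocado añado el barco completo a "tocados"
--     for i in range(len(lista_barcos)):
--         for j in range(len(lista_barcos[i])):
--             barcosHundidos += [lista_barcos[i][j]]
--             if lista_barcos[i][j] not in lista_tocados:
--                 for k in range(len(lista_barcos[i])):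
--                     barcosTocados += [lista_barcos[i][k]]
--     estadoCoordenadas = list()
--     #Para cada casilla tocada
--     for i in range(len(lista_tocados)):
--         #Si está tocado coloco una "T", si está hundido pero no tocado una "H" y si no es ningún caso una "A"
--         if lista_tocados[i] in barcosTocados:
--             estadoCoordenadas += ["T"]
--         elif lista_tocados[i] in barcosHundidos:
--             estadoCoordenadas += ["H"]
--         else:
--             estadoCoordenadas += ["A"]
--
--     #Dependiendo de en qué estado haya sido la última casilla tocada entramos en un estado o en otro
--     if estadoCoordenadas[-1] == "T":
--         estadoIA = 1
--     elif estadoCoordenadas[-1] == "A":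
--         estadoIA = 0
--     else:
--         estadoIA = 3
--     return estadoIA
-- ===== SOURCE B (Python) =====
-- def calcularEstadoIA(lista_barcos, lista_tocados):
--     # Only the last touched cell's classification matters: look it up directly.
--     last = lista_tocados[-1]
--     tocados = set(lista_tocados)
--     found = False
--     for barco in lista_barcos:
--         if last in barco:
--             found = True
--             if not all(c in tocados for c in barco):
--                 return 1
--     return 3 if found else 0
-- ===== Notes on version B (the rewrite author's own statement) =====
-- stated objective: faster
-- what changed: Instead of materialising the lists of all 'sunk' and 'touched-ship' cells (re-appending whole ships per un-hit cell) and classifying every touched cell, B extracts the last touched cell and scans the ships once, returning 1 on the first ship containing it that is not fully hit, else 3 if any ship contains it, else 0.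
import Mathlib
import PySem

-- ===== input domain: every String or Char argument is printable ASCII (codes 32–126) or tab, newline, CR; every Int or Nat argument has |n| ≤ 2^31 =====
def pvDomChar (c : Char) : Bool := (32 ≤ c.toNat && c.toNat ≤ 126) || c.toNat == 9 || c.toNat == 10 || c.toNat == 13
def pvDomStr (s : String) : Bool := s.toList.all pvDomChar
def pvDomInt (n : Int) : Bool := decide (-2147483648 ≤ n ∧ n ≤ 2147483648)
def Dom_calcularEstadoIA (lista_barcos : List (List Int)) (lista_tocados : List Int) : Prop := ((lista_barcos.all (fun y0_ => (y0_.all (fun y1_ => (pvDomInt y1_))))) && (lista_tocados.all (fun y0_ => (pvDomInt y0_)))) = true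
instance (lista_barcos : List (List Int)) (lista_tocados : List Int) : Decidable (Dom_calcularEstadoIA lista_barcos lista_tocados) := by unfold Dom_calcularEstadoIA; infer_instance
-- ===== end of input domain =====

-- B extracts the last touched cell and scans the ships once for it instead of
-- materialising the sunk/touched cell lists and classifying every touched cell (objective: faster, measured).

-- ===== PORT A =====
-- inner 'for j' loop of A (also runs the nested 'for k' loop as the ++ barco append)
def pvInnerHT (lista_tocados : List Int) (barco : List Int) : List Int → List Int × List Int → List Int × List Int
  | [], acc => acc
  | c :: cs, acc =>
      pvInnerHT lista_tocados barco cs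
        (acc.1 ++ [c], if lista_tocados.contains c then acc.2 else acc.2 ++ barco)

-- outer 'for i' loop of A
def pvBuildHT (lista_tocados : List Int) : List (List Int) → List Int × List Int → List Int × List Int
  | [], acc => acc
  | barco :: rest, acc => pvBuildHT lista_tocados rest (pvInnerHT lista_tocados barco barco acc)

-- second 'for i' loop of A building estadoCoordenadas
def pvEstado (bT bH : List Int) : List Int → List String → List String
  | [], acc => acc
  | c :: cs, acc => pvEstado bT bH cs (acc ++ [if bT.contains c then "T" else if bH.contains c then "H" else "A"])

def calcularEstadoIA (lista_barcos : List (List Int)) (lista_tocados : List Int) : Int :=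
  let ht := pvBuildHT lista_tocados lista_barcos ([], [])
  let barcosHundidos := ht.1
  let barcosTocados := ht.2
  let estadoCoordenadas := pvEstado barcosTocados barcosHundidos lista_tocados []
  let lastE := PySem.List.pyGet? estadoCoordenadas (-1)   -- IndexError (none) iff lista_tocados = []
  if lastE = some "T" then 1 else if lastE = some "A" then 0 else 3

-- ===== PORT B =====
-- the 'for barco in lista_barcos' loop of B, with early return 1
def pvAltScan (last : Int) (tocados : List Int) : List (List Int) → Bool → Int
  | [], found => if found then 3 else 0
  | barco :: rest, found =>
      if barco.contains last then
        if barco.all (fun c => tocados.contains c) then pvAltScan last tocados rest true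
        else 1
      else pvAltScan last tocados rest found

def calcularEstadoIA_alt (lista_barcos : List (List Int)) (lista_tocados : List Int) : Int :=
  match PySem.List.pyGet? lista_tocados (-1) with
  | none => 0   -- Python B raises IndexError here; excluded by Pre_
  | some last => pvAltScan last (PySem.Set.ofList lista_tocados) lista_barcos false

-- ===== PRECONDITION & SPEC =====
-- A evaluates estadoCoordenadas[-1], raising IndexError when lista_tocados is empty.
def Pre_calcularEstadoIA (lista_barcos : List (List Int)) (lista_tocados : List Int) : Prop := lista_tocados ≠ []
instance (lista_barcos : List (List Int)) (lista_tocados : List Int) : Decidable (Pre_calcularEstadoIA lista_barcos lista_tocados) := by unfold Pre_calcularEstadoIA; infer_instance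
def pvWitness_calcularEstadoIA : List (List Int) × List Int := ([[1, 2], [5]], [2, 5, 1])
def Spec_calcularEstadoIA (lista_barcos : List (List Int)) (lista_tocados : List Int) (out : Int) : Prop := out = calcularEstadoIA_alt lista_barcos lista_tocados
instance (lista_barcos : List (List Int)) (lista_tocados : List Int) (out : Int) : Decidable (Spec_calcularEstadoIA lista_barcos lista_tocados out) := by unfold Spec_calcularEstadoIA; infer_instance

-- ===== CLAIM (what is proved, stated in full; the proofs are below) =====
def Claim_equal_calcularEstadoIA : Prop := ∀ (lista_barcos : List (List Int)) (lista_tocados : List Int), Dom_calcularEstadoIA lista_barcos lista_tocados → Pre_calcularEstadoIA lista_barcos lista_tocados → Spec_calcularEstadoIA lista_barcos lista_tocados (calcularEstadoIA lista_barcos lista_tocados)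

-- ===== LEMMAS AND PROOFS =====

theorem mem_pvInnerHT_fst (lt b : List Int) (cs : List Int) (acc : List Int × List Int) (x : Int) :
    x ∈ (pvInnerHT lt b cs acc).1 ↔ x ∈ acc.1 ∨ x ∈ cs := by
  induction cs generalizing acc with
  | nil => simp [pvInnerHT]
  | cons c cs ih => simp [pvInnerHT, ih]; tauto

theorem mem_pvInnerHT_snd (lt b : List Int) (cs : List Int) (acc : List Int × List Int) (x : Int) :
    x ∈ (pvInnerHT lt b cs acc).2 ↔ x ∈ acc.2 ∨ (x ∈ b ∧ ∃ c ∈ cs, c ∉ lt) := by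
  induction cs generalizing acc with
  | nil => simp [pvInnerHT]
  | cons c cs ih =>
    simp only [pvInnerHT, ih]
    by_cases h : c ∈ lt
    · simp only [List.contains_iff_mem, h, if_pos]
      constructor
      · rintro (ha | ⟨hb, d, hd, hdn⟩)
        · exact Or.inl ha
        · exact Or.inr ⟨hb, d, List.mem_cons_of_mem _ hd, hdn⟩
      · rintro (ha | ⟨hb, d, hd, hdn⟩)
        · exact Or.inl ha
        · rcases List.mem_cons.mp hd with h' | h'
          · exact absurd (h' ▸ h) hdn
          · exact Or.inr ⟨hb, d, h', hdn⟩
    · simp only [List.contains_iff_mem, h, if_neg, not_false_iff, List.mem_append]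
      constructor
      · rintro ((ha | hb) | ⟨hb, d, hd, hdn⟩)
        · exact Or.inl ha
        · exact Or.inr ⟨hb, c, List.mem_cons_self .., h⟩
        · exact Or.inr ⟨hb, d, List.mem_cons_of_mem _ hd, hdn⟩
      · rintro (ha | ⟨hb, _, _, _⟩)
        · exact Or.inl (Or.inl ha)
        · exact Or.inl (Or.inr hb)

theorem mem_pvBuildHT_fst (lt : List Int) (ships : List (List Int)) (acc : List Int × List Int) (x : Int) :
    x ∈ (pvBuildHT lt ships acc).1 ↔ x ∈ acc.1 ∨ ∃ b ∈ ships, x ∈ b := by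
  induction ships generalizing acc with
  | nil => simp [pvBuildHT]
  | cons b rest ih => simp [pvBuildHT, ih, mem_pvInnerHT_fst]; tauto

theorem mem_pvBuildHT_snd (lt : List Int) (ships : List (List Int)) (acc : List Int × List Int) (x : Int) :
    x ∈ (pvBuildHT lt ships acc).2 ↔ x ∈ acc.2 ∨ ∃ b ∈ ships, x ∈ b ∧ ∃ c ∈ b, c ∉ lt := by
  induction ships generalizing acc with
  | nil => simp [pvBuildHT]
  | cons b rest ih =>
    simp only [pvBuildHT, ih, mem_pvInnerHT_snd, List.exists_mem_cons_iff]
    rw [or_assoc]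

theorem pvEstado_eq_map (bT bH : List Int) (cs : List Int) (acc : List String) :
    pvEstado bT bH cs acc = acc ++ cs.map (fun c => if bT.contains c then "T" else if bH.contains c then "H" else "A") := by
  induction cs generalizing acc with
  | nil => simp [pvEstado]
  | cons c cs ih => simp [pvEstado, ih]

theorem pvAltScan_spec (last : Int) (toc : List Int) (ships : List (List Int)) (found : Bool) :
    pvAltScan last toc ships found =
      if ∃ b ∈ ships, last ∈ b ∧ ∃ c ∈ b, c ∉ toc then 1
      else if found = true ∨ ∃ b ∈ ships, last ∈ b then 3 else 0 := by
  induction ships generalizing found with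
  | nil => simp [pvAltScan]
  | cons b rest ih =>
    simp only [pvAltScan, List.exists_mem_cons_iff, List.contains_iff_mem, List.all_eq_true, ih]
    by_cases hl : last ∈ b
    · by_cases hall : ∀ c ∈ b, c ∈ toc
      · by_cases hrest : ∃ b' ∈ rest, last ∈ b' ∧ ∃ c ∈ b', c ∉ toc
        · simp [hl, hrest]
        · have hno : ¬ ∃ c ∈ b, c ∉ toc := by simpa using hall
          simp [hl, hrest, hno]
      · have hex : ∃ c ∈ b, c ∉ toc := by simpa using hall
        simp [hl, hall, hex]
    · by_cases hrest : ∃ b' ∈ rest, last ∈ b' ∧ ∃ c ∈ b', c ∉ toc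
      · simp [hl, hrest]
      · rcases Bool.eq_false_or_eq_true found with hf | hf
        · subst hf
          by_cases h2 : ∃ b' ∈ rest, last ∈ b'
          · simp [hl, hrest, h2]
          · simp [hl, hrest, h2]
        · subst hf
          simp [hl, hrest]

theorem pvEstado_last (bT bH : List Int) (lt : List Int) (hne : lt ≠ []) :
    (lt.map (fun c => if bT.contains c then "T" else if bH.contains c then "H" else "A")).getLast? =
      some (if bT.contains (lt.getLast hne) then "T" else if bH.contains (lt.getLast hne) then "H" else "A") := by
  rw [List.getLast?_map, List.getLast?_eq_some_getLast hne, Option.map_some]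

-- ===== VERDICT (by name: the statement is the Claim_ definition above) =====
theorem calcularEstadoIA_spec : Claim_equal_calcularEstadoIA := by
  intro lb lt _dom hne
  unfold Spec_calcularEstadoIA
  have hlast : PySem.List.pyGet? lt (-1) = some (lt.getLast hne) := by
    rw [PySem.List.pyGet?_neg_one, List.getLast?_eq_some_getLast]
  simp only [calcularEstadoIA, calcularEstadoIA_alt, hlast, pvEstado_eq_map, List.nil_append,
    PySem.List.pyGet?_neg_one, pvEstado_last _ _ _ hne, pvAltScan_spec, PySem.Set.mem_ofList]
  have hT : lt.getLast hne ∈ (pvBuildHT lt lb ([], [])).2 ↔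
      ∃ b ∈ lb, lt.getLast hne ∈ b ∧ ∃ c ∈ b, c ∉ lt := by
    simpa using mem_pvBuildHT_snd lt lb ([], []) (lt.getLast hne)
  have hH : lt.getLast hne ∈ (pvBuildHT lt lb ([], [])).1 ↔ ∃ b ∈ lb, lt.getLast hne ∈ b := by
    simpa using mem_pvBuildHT_fst lt lb ([], []) (lt.getLast hne)
  by_cases h1 : ∃ b ∈ lb, lt.getLast hne ∈ b ∧ ∃ c ∈ b, c ∉ lt
  · simp [hT.mpr h1, h1]
  · have hTn : lt.getLast hne ∉ (pvBuildHT lt lb ([], [])).2 := fun h => h1 (hT.mp h)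
    by_cases h2 : ∃ b ∈ lb, lt.getLast hne ∈ b
    · simp [hTn, hH.mpr h2, h1, h2]
    · have hHn : lt.getLast hne ∉ (pvBuildHT lt lb ([], [])).1 := fun h => h2 (hH.mp h)
      simp [hTn, hHn, h1, h2]
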